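-- pv_equiv track=rewrite | github.com/eugeniusms/DAA-2023 | PR-1/1.py | mistery
-- ===== SOURCE A (Python) =====
-- def mistery(m, A):
--     x = 0
--     i = 0
--     while (i < len(A)):
--         temp = abs(A[i] - m)
--         if (temp > x):
--             x = temp
--         i += 1
--     return x
-- ===== SOURCE B (Python) =====
-- def mistery(m, A):
--     if not A:
--         return 0
--     return max(abs(max(A) - m), abs(min(A) - m))
-- ===== Notes on version B (the rewrite author's own statement) =====
-- stated objective: faster
-- what changed: Instead of tracking a running max of per-element absolute differences, B takes the min and max of A and returns max(|max-m|, |min-m|), since the farthest element from m is always one of the two extremes.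
import Mathlib
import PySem

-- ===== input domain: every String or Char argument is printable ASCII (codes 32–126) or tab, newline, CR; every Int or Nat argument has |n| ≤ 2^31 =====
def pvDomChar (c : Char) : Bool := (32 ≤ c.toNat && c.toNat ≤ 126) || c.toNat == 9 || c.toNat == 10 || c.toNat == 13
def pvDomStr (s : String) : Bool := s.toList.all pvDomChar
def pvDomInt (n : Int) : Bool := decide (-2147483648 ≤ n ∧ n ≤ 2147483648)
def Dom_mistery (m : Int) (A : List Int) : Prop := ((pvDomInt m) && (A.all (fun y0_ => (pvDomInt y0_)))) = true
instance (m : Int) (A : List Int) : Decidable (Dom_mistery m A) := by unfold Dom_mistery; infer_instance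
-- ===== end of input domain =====

-- B replaces the running max of per-element |a-m| by min/max of A and a closed-form comparison (objective: faster via C built-ins in Python).


-- ===== PORT A =====
-- while loop over indices, accumulating x; ported as a fold over the list with the same state.
def mistery (m : Int) (A : List Int) : Int :=
  A.foldl (fun x a => let temp := |a - m|; if temp > x then temp else x) 0

-- ===== PORT B =====
-- empty list -> 0; otherwise max(|max(A)-m|, |min(A)-m|) (Python's max/min ported as folds).
def mistery_alt (m : Int) (A : List Int) : Int :=
  match A with
  | [] => 0
  | a :: rest => max |rest.foldl max a - m| |rest.foldl min a - m|

-- ===== PRECONDITION & SPEC =====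
def Spec_mistery (m : Int) (A : List Int) (out : Int) : Prop := out = mistery_alt m A
instance (m : Int) (A : List Int) (out : Int) : Decidable (Spec_mistery m A out) := by unfold Spec_mistery; infer_instance

-- ===== CLAIM (what is proved, stated in full; the proofs are below) =====
def Claim_equal_mistery : Prop := ∀ (m : Int) (A : List Int), Dom_mistery m A → Spec_mistery m A (mistery m A)

-- ===== LEMMAS AND PROOFS =====

lemma mistery_step (x a m : Int) :
    (let temp := |a - m|; if temp > x then temp else x) = max x |a - m| := by
  dsimp only
  rcases abs_cases (a - m) with ⟨h, _⟩ | ⟨h, _⟩ <;> rw [h] <;> split_ifs <;> omega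

lemma mistery_foldl_max (m : Int) (l : List Int) (x : Int) :
    l.foldl (fun x a => let temp := |a - m|; if temp > x then temp else x) x
      = l.foldl (fun x a => max x |a - m|) x := by
  induction l generalizing x with
  | nil => rfl
  | cons a t ih => rw [List.foldl_cons, List.foldl_cons, mistery_step, ih]

lemma abs_max_min_step (m mn mx a : Int) (h : mn ≤ mx) :
    max (max |mx - m| |mn - m|) |a - m| = max |max mx a - m| |min mn a - m| := by
  rw [max_def mx a, min_def mn a]
  split_ifs <;>
    rcases abs_cases (mx - m) with ⟨h1, h1'⟩ | ⟨h1, h1'⟩ <;>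
    rcases abs_cases (mn - m) with ⟨h2, h2'⟩ | ⟨h2, h2'⟩ <;>
    rcases abs_cases (a - m) with ⟨h3, h3'⟩ | ⟨h3, h3'⟩ <;>
    simp only [h1, h2, h3] <;> omega

lemma mistery_inv (m : Int) (l : List Int) (mn mx : Int) (h : mn ≤ mx) :
    l.foldl (fun x a => max x |a - m|) (max |mx - m| |mn - m|)
      = max |l.foldl max mx - m| |l.foldl min mn - m| := by
  induction l generalizing mn mx with
  | nil => rfl
  | cons a t ih =>
    rw [List.foldl_cons, List.foldl_cons, List.foldl_cons, abs_max_min_step m mn mx a h,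
      ih (min mn a) (max mx a) (le_trans (min_le_left mn a) (le_trans h (le_max_left mx a)))]

-- ===== VERDICT (by name: the statement is the Claim_ definition above) =====
theorem mistery_spec : Claim_equal_mistery := by
  intro m A _
  unfold Spec_mistery mistery mistery_alt
  match A with
  | [] => rfl
  | a :: rest =>
    rw [List.foldl_cons, mistery_step, mistery_foldl_max]
    have h0 : max (0 : Int) |a - m| = max |a - m| |a - m| := by
      simp [abs_nonneg]
    rw [h0, mistery_inv m rest a a le_rfl]
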